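-- pv_equiv track=rewrite | github.com/Leesty/site_contacts | core/lead_utils.py | extract_username_from_contact
-- ===== SOURCE A (Python) =====
-- def extract_username_from_contact(normalized: str) -> str | None:
--     """Извлекает «чистый» идентификатор из нормализованного контакта (без префикса платформы).
--     telegram:marina_k → marina_k, vk:marina_k → marina_k, ig:marina_k → marina_k.
--     Для телефонов и прочих — None (кросс-платформенная проверка не применима)."""
--     if not normalized:
--         return None
--     for prefix in ("telegram:", "vk:", "ig:", "ok:"):
--         if normalized.startswith(prefix):
--             username = normalized[len(prefix):].strip().lower()
--             if username and not username.startswith("id") and len(username) >= 3: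
--                 return username
--     return None
-- ===== SOURCE B (Python) =====
-- def extract_username_from_contact(normalized: str) -> str | None:
--     """Parse once: split on the first colon, look the platform up, validate the rest."""
--     platform, sep, rest = normalized.partition(":")
--     if sep != ":" or platform not in ("telegram", "vk", "ig", "ok"):
--         return None
--     username = rest.strip().lower()
--     if len(username) >= 3 and not username.startswith("id"):
--         return username
--     return None
-- ===== Notes on version B (the rewrite author's own statement) =====
-- stated objective: simpler
-- what changed: B splits the input once at the first colon with str.partition and looks the platform token up in a tuple, instead of A's loop trying each platform prefix with startswith and slicing; the emptiness check is folded into len>=3.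
import Mathlib
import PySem

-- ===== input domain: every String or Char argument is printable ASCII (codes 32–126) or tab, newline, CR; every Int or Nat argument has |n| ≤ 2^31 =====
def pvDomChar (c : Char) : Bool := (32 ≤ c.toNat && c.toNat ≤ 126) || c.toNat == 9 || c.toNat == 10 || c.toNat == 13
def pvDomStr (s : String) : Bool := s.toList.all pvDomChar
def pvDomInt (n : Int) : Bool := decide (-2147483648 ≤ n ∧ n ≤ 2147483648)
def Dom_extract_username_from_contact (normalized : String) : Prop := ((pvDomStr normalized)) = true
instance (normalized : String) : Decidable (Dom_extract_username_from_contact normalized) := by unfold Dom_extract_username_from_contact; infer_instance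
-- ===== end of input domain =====

-- B parses the string once: split at the FIRST colon (str.partition) and look the platform token
-- up in a tuple, instead of A's loop testing four prefix tests done with startswith and slicing;
-- objective: simpler. A = B on every input.

-- ===== PORT A =====
-- the for-loop over the prefix tuple: try each prefix in order, return on success, else fall through
def euA_loop (cs : List Char) : List (List Char) → Option (List Char)
  | [] => none
  | p :: ps =>
    if PySem.Chars.startswith cs p then
      -- username = normalized[len(prefix):].strip().lower()
      let username := PySem.Chars.lower (PySem.Chars.strip (PySem.Chars.slice cs (some (p.length : Int)) none))
      if username ≠ [] ∧ PySem.Chars.startswith username ['i', 'd'] = false ∧ 3 ≤ username.length then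
        some username
      else euA_loop cs ps
    else euA_loop cs ps

def extract_username_from_contact (normalized : String) : Option String :=
  if normalized.toList = [] then none        -- if not normalized: return None
  else
    (euA_loop normalized.toList
      [['t', 'e', 'l', 'e', 'g', 'r', 'a', 'm', ':'], ['v', 'k', ':'], ['i', 'g', ':'], ['o', 'k', ':']]).map
      String.ofList

-- ===== PORT B =====
-- platform, sep, rest = normalized.partition(":")  — split at the FIRST colon.
-- (partition ported by hand via takeWhile/dropWhile on the char list; exact: takeWhile (· ≠ ':')
--  is everything before the first ':', dropWhile is '' when no colon, else starts with that ':')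
def extract_username_from_contact_alt (normalized : String) : Option String :=
  match normalized.toList.dropWhile (· ≠ ':') with
  | [] => none                               -- sep != ":" → None
  | _ :: rest =>
    if normalized.toList.takeWhile (· ≠ ':') ∈
        [['t', 'e', 'l', 'e', 'g', 'r', 'a', 'm'], ['v', 'k'], ['i', 'g'], ['o', 'k']] then
      let username := PySem.Chars.lower (PySem.Chars.strip rest)
      if 3 ≤ username.length ∧ PySem.Chars.startswith username ['i', 'd'] = false then
        some (String.ofList username)
      else none
    else none                                -- platform not in the tuple → None

-- ===== PRECONDITION & SPEC =====
def Spec_extract_username_from_contact (normalized : String) (out : Option String) : Prop := out = extract_username_from_contact_alt normalized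
instance (normalized : String) (out : Option String) : Decidable (Spec_extract_username_from_contact normalized out) := by unfold Spec_extract_username_from_contact; infer_instance

-- ===== CLAIM (what is proved, stated in full; the proofs are below) =====
def Claim_equal_extract_username_from_contact : Prop := ∀ (normalized : String), Dom_extract_username_from_contact normalized → Spec_extract_username_from_contact normalized (extract_username_from_contact normalized)

-- ===== LEMMAS AND PROOFS =====

-- the head of a non-empty dropWhile fails the predicate
theorem eu_dropWhile_head (p : Char → Bool) :
    ∀ (cs : List Char) (c : Char) (t : List Char), cs.dropWhile p = c :: t → p c = false := by
  intro cs
  induction cs with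
  | nil => intro c t h; simp [List.dropWhile] at h
  | cons a l ih =>
    intro c t h
    by_cases ha : p a
    · rw [List.dropWhile_cons_of_pos ha] at h
      exact ih c t h
    · rw [List.dropWhile_cons_of_neg ha] at h
      injection h with h1 _
      rw [← h1]
      exact Bool.eq_false_iff.mpr ha

-- startswith (q ++ ":") ↔ everything before the first ':' is exactly q (and a ':' exists)
theorem eu_prefix_iff (cs q : List Char) (hq : ':' ∉ q) :
    (q ++ [':']) <+: cs ↔ cs.takeWhile (· ≠ ':') = q ∧ cs.dropWhile (· ≠ ':') ≠ [] := by
  induction q generalizing cs with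
  | nil =>
    cases cs with
    | nil => simp
    | cons c t =>
      by_cases hc : c = ':'
      · subst hc
        simp [List.cons_prefix_iff]
      · constructor
        · intro h
          rw [List.nil_append, List.cons_prefix_iff] at h
          obtain ⟨l', hl, -⟩ := h
          injection hl with h1 _
          exact absurd h1 hc
        · rintro ⟨h, -⟩
          rw [List.takeWhile_cons] at h
          simp [hc] at h
  | cons a q ih =>
    have ha : a ≠ ':' := fun h => hq (h ▸ List.mem_cons_self)
    cases cs with
    | nil => simp
    | cons c t =>
      by_cases hc : c = a
      · subst hc
        simp [List.cons_prefix_iff, List.takeWhile, List.dropWhile, ha,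
          ih t (fun h => hq (List.mem_cons_of_mem _ h))]
      · rw [List.cons_append]
        constructor
        · intro h
          rw [List.cons_prefix_iff] at h
          obtain ⟨l', hl, -⟩ := h
          injection hl with h1 _
          exact absurd h1 hc
        · rintro ⟨h, -⟩
          rw [List.takeWhile_cons] at h
          by_cases hcc : c = ':' <;> simp [hcc] at h
          exact absurd h.1 hc

theorem eu_startswith_false (cs q : List Char) (hq : ':' ∉ q)
    (h : ¬ (cs.takeWhile (· ≠ ':') = q ∧ cs.dropWhile (· ≠ ':') ≠ [])) :
    PySem.Chars.startswith cs (q ++ [':']) = false := by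
  rw [← Bool.not_eq_true, PySem.Chars.startswith_iff, eu_prefix_iff cs q hq]
  exact h

-- if no remaining prefix matches, A's loop returns None
theorem euA_loop_none (cs : List Char) (ps : List (List Char))
    (h : ∀ p ∈ ps, PySem.Chars.startswith cs p = false) : euA_loop cs ps = none := by
  induction ps with
  | nil => rfl
  | cons p ps ih =>
    simp only [euA_loop, h p List.mem_cons_self]
    simp only [Bool.false_eq_true, if_false]
    exact ih (fun q hq => h q (List.mem_cons_of_mem _ hq))

-- the drop a matching prefix leaves is exactly the tail after the first colon
theorem eu_slice_eq (cs q t : List Char) (htw : cs.takeWhile (· ≠ ':') = q)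
    (hdw : cs.dropWhile (· ≠ ':') = ':' :: t) :
    PySem.Chars.slice cs (some (((q ++ [':']).length : Nat) : Int)) none = t := by
  have hcs : cs = (q ++ [':']) ++ t := by
    rw [← List.takeWhile_append_dropWhile (p := fun x => decide (x ≠ ':')) (l := cs), htw, hdw]
    simp
  rw [PySem.Chars.slice_eq_listSlice]
  rw [PySem.List.slice_from]
  · rw [hcs, Int.toNat_natCast]
    exact List.drop_left
  · exact Int.natCast_nonneg _

-- characterization of A's loop when every prefix is "<platform>:" and the prefixes are distinct
theorem euA_loop_eq (cs : List Char) (ps : List (List Char))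
    (hps : ∀ p ∈ ps, ∃ q, p = q ++ [':'] ∧ ':' ∉ q) (hnd : ps.Nodup) :
    euA_loop cs ps =
      match cs.dropWhile (· ≠ ':') with
      | [] => none
      | _ :: t =>
        if (cs.takeWhile (· ≠ ':')) ++ [':'] ∈ ps then
          let username := PySem.Chars.lower (PySem.Chars.strip t)
          if username ≠ [] ∧ PySem.Chars.startswith username ['i', 'd'] = false ∧ 3 ≤ username.length
          then some username else none
        else none := by
  induction ps with
  | nil =>
    cases cs.dropWhile (· ≠ ':') <;> simp [euA_loop]
  | cons p ps ih =>
    obtain ⟨q, rfl, hq⟩ := hps p List.mem_cons_self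
    have hps' : ∀ p ∈ ps, ∃ q, p = q ++ [':'] ∧ ':' ∉ q :=
      fun p hp => hps p (List.mem_cons_of_mem _ hp)
    by_cases hs : PySem.Chars.startswith cs (q ++ [':']) = true
    · have hs' : (q ++ [':']) <+: cs := by rw [PySem.Chars.startswith_iff] at hs; exact hs
      obtain ⟨htw, hdwne⟩ := (eu_prefix_iff cs q hq).1 hs'
      obtain ⟨c, t, hdw⟩ : ∃ c t, cs.dropWhile (· ≠ ':') = c :: t := by
        cases h : cs.dropWhile (· ≠ ':') with
        | nil => exact absurd h hdwne
        | cons c t => exact ⟨c, t, rfl⟩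
      have hc : c = ':' := by
        have := eu_dropWhile_head _ cs c t hdw
        simpa using this
      subst hc
      have hslice := eu_slice_eq cs q t htw hdw
      have hmem : cs.takeWhile (· ≠ ':') ++ [':'] ∈ (q ++ [':']) :: ps := by
        rw [htw]; exact List.mem_cons_self
      simp only [euA_loop, hs, if_true, hslice, hdw, hmem]
      by_cases hcond : (PySem.Chars.lower (PySem.Chars.strip t) ≠ [] ∧
          PySem.Chars.startswith (PySem.Chars.lower (PySem.Chars.strip t)) ['i', 'd'] = false ∧
          3 ≤ (PySem.Chars.lower (PySem.Chars.strip t)).length)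
      · simp [hcond]
      · -- the first prefix matched but the username was rejected: no later prefix can match
        have hnone : euA_loop cs ps = none := by
          apply euA_loop_none
          intro p' hp'
          obtain ⟨q', rfl, hq'⟩ := hps' p' hp'
          apply eu_startswith_false cs q' hq'
          rintro ⟨htw', -⟩
          have : q' = q := by rw [← htw, ← htw']
          subst this
          exact (List.nodup_cons.mp hnd).1 hp'
        simp [hcond, hnone]
    · have hnm : ¬ (cs.takeWhile (· ≠ ':') = q ∧ cs.dropWhile (· ≠ ':') ≠ []) := by
        intro h
        apply hs
        rw [PySem.Chars.startswith_iff]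
        exact (eu_prefix_iff cs q hq).2 h
      simp only [euA_loop, hs]
      rw [ih hps' (List.nodup_cons.mp hnd).2]
      cases hdw : cs.dropWhile (· ≠ ':') with
      | nil => rfl
      | cons c t =>
        have hdwne : cs.dropWhile (· ≠ ':') ≠ [] := by rw [hdw]; simp
        have hq2 : ¬ cs.takeWhile (· ≠ ':') = q := fun h => hnm ⟨h, hdwne⟩
        simp only [ne_eq, decide_not] at hq2
        simp [hq2]

-- A's acceptance test equals B's: nonempty is implied by length ≥ 3, and the order is immaterial
theorem eu_branch (u : List Char) :
    (if u ≠ [] ∧ PySem.Chars.startswith u ['i', 'd'] = false ∧ 3 ≤ u.length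
      then some u else none).map String.ofList
    = (if 3 ≤ u.length ∧ PySem.Chars.startswith u ['i', 'd'] = false
      then some (String.ofList u) else none) := by
  by_cases h3 : 3 ≤ u.length
  · have hne : u ≠ [] := by intro h; rw [h] at h3; simp at h3
    by_cases hid : PySem.Chars.startswith u ['i', 'd'] = false
    · simp [h3, hid, hne]
    · simp [h3, hid]
  · simp [h3]

-- ===== VERDICT (by name: the statement is the Claim_ definition above) =====
theorem extract_username_from_contact_spec : Claim_equal_extract_username_from_contact := by
  intro normalized _
  unfold Spec_extract_username_from_contact extract_username_from_contact extract_username_from_contact_alt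
  rw [euA_loop_eq normalized.toList _
    (by
      intro p hp
      simp only [List.mem_cons, List.not_mem_nil, or_false] at hp
      rcases hp with rfl | rfl | rfl | rfl
      · exact ⟨['t', 'e', 'l', 'e', 'g', 'r', 'a', 'm'], rfl, by decide⟩
      · exact ⟨['v', 'k'], rfl, by decide⟩
      · exact ⟨['i', 'g'], rfl, by decide⟩
      · exact ⟨['o', 'k'], rfl, by decide⟩)
    (by decide)]
  cases hdw : normalized.toList.dropWhile (· ≠ ':') with
  | nil =>
    by_cases h : normalized.toList = [] <;> simp [h]
  | cons c t =>
    have hcs : normalized.toList ≠ [] := by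
      intro h; rw [h] at hdw; simp at hdw
    simp only [hcs, if_false]
    simp only [List.mem_cons, List.not_mem_nil, or_false, ne_eq, decide_not]
    by_cases hmem : (List.takeWhile (fun x => !decide (x = ':')) normalized.toList = ['t', 'e', 'l', 'e', 'g', 'r', 'a', 'm'] ∨
        List.takeWhile (fun x => !decide (x = ':')) normalized.toList = ['v', 'k'] ∨
        List.takeWhile (fun x => !decide (x = ':')) normalized.toList = ['i', 'g'] ∨
        List.takeWhile (fun x => !decide (x = ':')) normalized.toList = ['o', 'k'])
    · have hmem' : (List.takeWhile (fun x => !decide (x = ':')) normalized.toList ++ [':'] = ['t', 'e', 'l', 'e', 'g', 'r', 'a', 'm', ':'] ∨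
          List.takeWhile (fun x => !decide (x = ':')) normalized.toList ++ [':'] = ['v', 'k', ':'] ∨
          List.takeWhile (fun x => !decide (x = ':')) normalized.toList ++ [':'] = ['i', 'g', ':'] ∨
          List.takeWhile (fun x => !decide (x = ':')) normalized.toList ++ [':'] = ['o', 'k', ':']) := by
        rcases hmem with h | h | h | h <;> rw [h] <;> simp
      rw [if_pos hmem', if_pos hmem]
      exact eu_branch (PySem.Chars.lower (PySem.Chars.strip t))
    · have hmem' : ¬ (List.takeWhile (fun x => !decide (x = ':')) normalized.toList ++ [':'] = ['t', 'e', 'l', 'e', 'g', 'r', 'a', 'm', ':'] ∨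
          List.takeWhile (fun x => !decide (x = ':')) normalized.toList ++ [':'] = ['v', 'k', ':'] ∨
          List.takeWhile (fun x => !decide (x = ':')) normalized.toList ++ [':'] = ['i', 'g', ':'] ∨
          List.takeWhile (fun x => !decide (x = ':')) normalized.toList ++ [':'] = ['o', 'k', ':']) := by
        intro h
        apply hmem
        rcases h with h | h | h | h
        · exact Or.inl ((List.append_left_inj [':']).mp h)
        · exact Or.inr (Or.inl ((List.append_left_inj [':']).mp h))
        · exact Or.inr (Or.inr (Or.inl ((List.append_left_inj [':']).mp h)))
        · exact Or.inr (Or.inr (Or.inr ((List.append_left_inj [':']).mp h)))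
      rw [if_neg hmem', if_neg hmem]
      simp
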